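-- pv_equiv track=rewrite | github.com/ericdebelak/advent-of-code | 2020/14/tasks.py | _add_mem_permutations
-- ===== SOURCE A (Python) =====
-- from copy import copy
--
-- def _get_modifier(index):
--     if index == 0:
--         return 1
--     return 2 * _get_modifier(index - 1)
--
-- def _get_indexes_for_x(mask):
--     reversed_mask = mask[::-1]
--     return [i for i, char in enumerate(reversed_mask) if char == 'X']
--
-- def _add_mem_permutations(mask, binary_string_with_0, mem_value, mem):
--     value_with_0s = int(binary_string_with_0, 2)  # this is our starting point, the permutation with all 0s
--     previous_values = [value_with_0s]
--     mem[value_with_0s] = mem_value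
--     x_indexes = _get_indexes_for_x(mask)  # get our indexes for x in reverse order, so we know where we change things
--     for index in x_indexes:
--         modifier = _get_modifier(index)  # our modifier is the value at that position in the binary string for 1
--         previous = copy(previous_values)
--         for value in previous:
--             key = value + int(modifier)  # add our modifier for each previous value
--             mem[key] = mem_value  # set the mem dict with the key and original value
--             previous_values.append(key)
--     return mem
-- ===== SOURCE B (Python) =====
-- def _add_mem_permutations(mask, binary_string_with_0, mem_value, mem):
--     # direct subset enumeration: j counts 0..2^n-1, bit k of j selects the k-th X bit-value
--     bits = [1 << i for i, c in enumerate(mask[::-1]) if c == 'X']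
--     v0 = int(binary_string_with_0, 2)
--     for j in range(1 << len(bits)):
--         key = v0
--         for b in bits:
--             if j % 2:
--                 key += b
--             j //= 2
--         mem[key] = mem_value
--     return mem
-- ===== Notes on version B (the rewrite author's own statement) =====
-- stated objective: alternative
-- what changed: Replaces the growing previous_values accumulator (doubled once per X) and the recursive _get_modifier helper with a direct enumeration: a single counter over range(2**n) whose bits select which X bit-values (1<<i) to add to the base address.
import Mathlib
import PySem

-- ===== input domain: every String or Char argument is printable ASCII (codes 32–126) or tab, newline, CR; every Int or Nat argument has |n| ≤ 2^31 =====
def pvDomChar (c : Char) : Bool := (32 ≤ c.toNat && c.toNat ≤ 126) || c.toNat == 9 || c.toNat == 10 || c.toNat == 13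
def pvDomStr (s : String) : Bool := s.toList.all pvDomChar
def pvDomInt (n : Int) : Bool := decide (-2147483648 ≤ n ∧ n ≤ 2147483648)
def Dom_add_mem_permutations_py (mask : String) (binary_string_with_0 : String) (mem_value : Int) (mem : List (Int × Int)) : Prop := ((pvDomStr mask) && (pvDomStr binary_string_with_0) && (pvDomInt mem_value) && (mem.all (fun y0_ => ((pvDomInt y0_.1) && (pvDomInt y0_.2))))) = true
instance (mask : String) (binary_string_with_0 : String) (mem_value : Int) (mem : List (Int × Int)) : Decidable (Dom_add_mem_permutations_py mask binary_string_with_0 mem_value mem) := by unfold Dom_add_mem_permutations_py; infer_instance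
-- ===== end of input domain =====

-- B replaces A's growing previous_values list and recursive _get_modifier with a direct
-- enumeration of all 2^n bit combinations (a counter whose bits select the X bit-values).
-- Equivalence is about the RETURN value; Python A mutates the mem dict in place (B does the same).

-- ===== PORT A =====

-- _get_modifier: Python recursion on a nonnegative int index; ported structurally on index.toNat
-- (every call site passes an enumerate index, which is ≥ 0, where this is exact).
def pvGetModifierNat : Nat → Int
  | 0 => 1
  | n + 1 => 2 * pvGetModifierNat n

def pvGetModifier (index : Int) : Int := pvGetModifierNat index.toNat

-- _get_indexes_for_x: mask[::-1] is PySem.List.slice? … (-1) (always some; getD [] is never taken)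
def pvGetIndexesForX (mask : String) : List Int :=
  (PySem.List.enumerate ((PySem.List.slice? mask.toList none none (-1)).getD [])).filterMap
    (fun ic => if ic.2 = 'X' then some ic.1 else none)

def add_mem_permutations_py (mask : String) (binary_string_with_0 : String) (mem_value : Int) (mem : List (Int × Int)) : List (Int × Int) :=
  match PySem.Int.ofStrBase? binary_string_with_0 2 with
  | none => []   -- int(s, 2) raises ValueError: excluded by Pre_
  | some value_with_0s =>
    let st0 : List Int × PySem.Dict Int Int :=
      ([value_with_0s], (PySem.Dict.ofList mem).insert value_with_0s mem_value)
    let st := (pvGetIndexesForX mask).foldl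
      (fun (st : List Int × PySem.Dict Int Int) index =>
        let modifier := pvGetModifier index
        let previous := st.1   -- copy(previous_values)
        previous.foldl
          (fun (st2 : List Int × PySem.Dict Int Int) value =>
            let key := value + modifier
            (st2.1 ++ [key], st2.2.insert key mem_value))
          st)
      st0
    st.2.items

-- ===== PORT B =====

def add_mem_permutations_py_alt (mask : String) (binary_string_with_0 : String) (mem_value : Int) (mem : List (Int × Int)) : List (Int × Int) :=
  let bits : List Int :=
    (PySem.List.enumerate ((PySem.List.slice? mask.toList none none (-1)).getD [])).filterMap
      (fun ic => if ic.2 = 'X' then some ((1 : Int) <<< ic.1.toNat) else none)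
  match PySem.Int.ofStrBase? binary_string_with_0 2 with
  | none => []   -- int(s, 2) raises ValueError: excluded by Pre_
  | some v0 =>
    let d := (PySem.List.pyRange 0 ((1 : Int) <<< bits.length) 1).foldl
      (fun (d : PySem.Dict Int Int) j =>
        let key := (bits.foldl
          (fun (kj : Int × Int) b =>
            (if PySem.Int.mod kj.2 2 ≠ 0 then kj.1 + b else kj.1, PySem.Int.floordiv kj.2 2))
          (v0, j)).1
        d.insert key mem_value)
      (PySem.Dict.ofList mem)
    d.items

-- ===== PRECONDITION & SPEC =====
-- Pre_: binary_string_with_0 must parse as int(s, 2) (else Python raises ValueError in both A and B).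
def Pre_add_mem_permutations_py (mask : String) (binary_string_with_0 : String) (mem_value : Int) (mem : List (Int × Int)) : Prop :=
  (PySem.Int.ofStrBase? binary_string_with_0 2).isSome
instance (mask : String) (binary_string_with_0 : String) (mem_value : Int) (mem : List (Int × Int)) : Decidable (Pre_add_mem_permutations_py mask binary_string_with_0 mem_value mem) := by unfold Pre_add_mem_permutations_py; infer_instance

def pvWitness_add_mem_permutations_py : String × String × Int × (List (Int × Int)) := ("X1X", "010", 7, [(2, 3)])

def Spec_add_mem_permutations_py (mask : String) (binary_string_with_0 : String) (mem_value : Int) (mem : List (Int × Int)) (out : List (Int × Int)) : Prop := out = add_mem_permutations_py_alt mask binary_string_with_0 mem_value mem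
instance (mask : String) (binary_string_with_0 : String) (mem_value : Int) (mem : List (Int × Int)) (out : List (Int × Int)) : Decidable (Spec_add_mem_permutations_py mask binary_string_with_0 mem_value mem out) := by unfold Spec_add_mem_permutations_py; infer_instance

-- ===== CLAIM (what is proved, stated in full; the proofs are below) =====
def Claim_equal_add_mem_permutations_py : Prop := ∀ (mask : String) (binary_string_with_0 : String) (mem_value : Int) (mem : List (Int × Int)), Dom_add_mem_permutations_py mask binary_string_with_0 mem_value mem → Pre_add_mem_permutations_py mask binary_string_with_0 mem_value mem → Spec_add_mem_permutations_py mask binary_string_with_0 mem_value mem (add_mem_permutations_py mask binary_string_with_0 mem_value mem)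

-- ===== LEMMAS AND PROOFS =====

-- fold inserting each key with the same value
def pvIns (mv : Int) (d : PySem.Dict Int Int) (ks : List Int) : PySem.Dict Int Int :=
  ks.foldl (fun d k => d.insert k mv) d

-- A's doubling of previous_values
def pvDbl (P : List Int) : List Int → List Int
  | [] => P
  | b :: bs => pvDbl (P ++ P.map (· + b)) bs

-- subset sum selected by the bits of a Nat counter
def pvSel : List Int → Nat → Int
  | [], _ => 0
  | b :: bs, j => (if j % 2 = 1 then b else 0) + pvSel bs (j / 2)

theorem pvSel_zero (bs : List Int) : pvSel bs 0 = 0 := by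
  induction bs with
  | nil => rfl
  | cons b bs ih => simp [pvSel, ih]

-- A's inner loop over the snapshot `previous`
theorem pvInnerA (mv b : Int) (prev : List Int) (P : List Int) (d : PySem.Dict Int Int) :
    prev.foldl (fun (st2 : List Int × PySem.Dict Int Int) value =>
        ((st2.1 ++ [value + b], st2.2.insert (value + b) mv) : List Int × PySem.Dict Int Int))
      (P, d)
    = (P ++ prev.map (· + b), pvIns mv d (prev.map (· + b))) := by
  induction prev generalizing P d with
  | nil => simp [pvIns]
  | cons v vs ih => simp [ih, pvIns, List.foldl_cons]

theorem pvDbl_prefix (bs : List Int) (P : List Int) : P <+: pvDbl P bs := by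
  induction bs generalizing P with
  | nil => exact List.prefix_refl P
  | cons b bs ih => exact List.prefix_append P (P.map (· + b)) |>.trans (ih _)

-- A's outer loop, characterised by pvDbl over the modifier list
theorem pvOuterA (mv : Int) (idxs : List Int) (P : List Int) (d : PySem.Dict Int Int) :
    idxs.foldl (fun (st : List Int × PySem.Dict Int Int) index =>
        st.1.foldl (fun (st2 : List Int × PySem.Dict Int Int) value =>
          (st2.1 ++ [value + pvGetModifier index], st2.2.insert (value + pvGetModifier index) mv)) st)
      (P, d)
    = (pvDbl P (idxs.map pvGetModifier),
       pvIns mv d ((pvDbl P (idxs.map pvGetModifier)).drop P.length)) := by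
  induction idxs generalizing P d with
  | nil => simp [pvDbl, pvIns]
  | cons i idxs ih =>
    rw [List.foldl_cons, pvInnerA, ih, List.map_cons, pvDbl]
    obtain ⟨T, hT⟩ := pvDbl_prefix (idxs.map pvGetModifier) (P ++ P.map (· + pvGetModifier i))
    rw [← hT]
    simp [pvIns, List.foldl_append]

-- range doubling
theorem pvRangeDouble (n : Nat) :
    List.range (2 * n) = (List.range n).flatMap (fun j => [2 * j, 2 * j + 1]) := by
  induction n with
  | zero => rfl
  | succ n ih =>
    have : 2 * (n + 1) = (2 * n) + 1 + 1 := by omega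
    rw [this, List.range_succ, List.range_succ, List.range_succ, ih]
    simp

-- core: the doubling construction is the counter enumeration
theorem pvDblEnum (bs : List Int) (P : List Int) :
    pvDbl P bs = (List.range (2 ^ bs.length)).flatMap (fun j => P.map (· + pvSel bs j)) := by
  induction bs generalizing P with
  | nil => simp [pvDbl, pvSel]
  | cons b bs ih =>
    rw [pvDbl, ih]
    have h2 : (2 : Nat) ^ (b :: bs).length = 2 * 2 ^ bs.length := by
      simp [List.length_cons]; ring
    rw [h2, pvRangeDouble, List.flatMap_assoc]
    refine List.flatMap_congr (fun j _ => ?_)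
    have e1 : pvSel (b :: bs) (2 * j) = pvSel bs j := by
      simp [pvSel, Nat.mul_div_cancel_left _ (by norm_num : 0 < 2), Nat.mul_mod_right]
    have e2 : pvSel (b :: bs) (2 * j + 1) = b + pvSel bs j := by
      have : (2 * j + 1) / 2 = j := by omega
      have hm : (2 * j + 1) % 2 = 1 := by omega
      simp [pvSel, this, hm]
    simp [e1, e2, List.map_map]

-- B's inner key loop computes v0 + pvSel
theorem pvKeyB (bs : List Int) (v0 : Int) (m : Nat) :
    (bs.foldl (fun (kj : Int × Int) b =>
        (if PySem.Int.mod kj.2 2 ≠ 0 then kj.1 + b else kj.1, PySem.Int.floordiv kj.2 2))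
      (v0, (m : Int))).1 = v0 + pvSel bs m := by
  induction bs generalizing v0 m with
  | nil => simp [pvSel]
  | cons b bs ih =>
    rw [List.foldl_cons]
    have hmod : PySem.Int.mod ((m : Int)) 2 = ((m % 2 : Nat) : Int) := by simp
    have hdiv : PySem.Int.floordiv ((m : Int)) 2 = ((m / 2 : Nat) : Int) := by simp
    simp only [hmod, hdiv]
    by_cases h : m % 2 = 1
    · rw [if_pos (by simp [h] : ¬ ((m % 2 : Nat) : Int) = 0 )]
      rw [ih]
      simp [pvSel, h]; ring
    · have h0 : m % 2 = 0 := by omega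
      rw [if_neg (by simp [h0] : ¬ ¬ ((m % 2 : Nat) : Int) = 0 )]
      rw [ih]
      simp [pvSel, h0]

theorem pvModEq (n : Nat) : pvGetModifierNat n = 2 ^ n := by
  induction n with
  | zero => rfl
  | succ n ih => simp [pvGetModifierNat, ih]; ring

theorem pvShift (i : Int) : (1 : Int) <<< ((i.toNat : Int)) = pvGetModifier i := by
  rw [pvGetModifier, pvModEq, show (1 : Int) = ((1 : Nat) : Int) from rfl, Int.shiftLeft_natCast]
  push_cast [Nat.shiftLeft_eq]
  ring

-- B's X bit-values list equals A's modifier list over the X indexes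
theorem pvBitsEq (mask : String) :
    (PySem.List.enumerate ((PySem.List.slice? mask.toList none none (-1)).getD [])).filterMap
      (fun ic => if ic.2 = 'X' then some ((1 : Int) <<< ic.1.toNat) else none)
    = (pvGetIndexesForX mask).map pvGetModifier := by
  unfold pvGetIndexesForX
  rw [List.map_filterMap]
  refine List.filterMap_congr (fun ic _ => ?_)
  by_cases h : ic.2 = 'X'
  · rw [if_pos h, if_pos h, Option.map_some]
    exact congrArg some (pvShift ic.1)
  · rw [if_neg h, if_neg h]; rfl

theorem pvFlatMapSingleton (v0 : Int) (mods : List Int) (L : List Nat) :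
    L.flatMap (fun j => [v0 + pvSel mods j]) = L.map (fun j => v0 + pvSel mods j) := by
  induction L with
  | nil => rfl
  | cons x xs ih => simp [ih]

set_option maxHeartbeats 2000000 in
theorem pvMain (mask : String) (bs : String) (mv : Int) (mem : List (Int × Int)) (v0 : Int)
    (hv0 : PySem.Int.ofStrBase? bs 2 = some v0) :
    add_mem_permutations_py mask bs mv mem = add_mem_permutations_py_alt mask bs mv mem := by
  simp only [add_mem_permutations_py, add_mem_permutations_py_alt, hv0]
  rw [pvBitsEq]
  rw [pvOuterA]
  set mods := (pvGetIndexesForX mask).map pvGetModifier with hmods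
  set d0 := PySem.Dict.ofList mem with hd0
  -- the range of counters, as casts of naturals
  have hr : PySem.List.pyRange 0 ((1 : Int) <<< mods.length) 1
      = (List.range (2 ^ mods.length)).map (Nat.cast : Nat → Int) := by
    have : ((1 : Int) <<< mods.length) = ((2 ^ mods.length : Nat) : Int) := by
      norm_cast
      simp [Nat.shiftLeft_eq]
    rw [this, PySem.List.pyRange_one, Int.sub_zero, Int.toNat_natCast]
    exact List.map_congr_left (fun k _ => by rw [zero_add])
  rw [hr, List.foldl_map]
  simp only [pvKeyB]
  -- both dicts are pvIns over the same key list
  have hdbl : pvDbl [v0] mods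
      = (List.range (2 ^ mods.length)).map (fun j => v0 + pvSel mods j) := by
    rw [pvDblEnum]
    simp only [List.map_singleton]
    exact pvFlatMapSingleton v0 mods _
  have hpos : 2 ^ mods.length = (2 ^ mods.length - 1) + 1 := by
    have : 0 < 2 ^ mods.length := by positivity
    omega
  have hsplit : (List.range (2 ^ mods.length)).map (fun j => v0 + pvSel mods j)
      = v0 :: ((List.range (2 ^ mods.length - 1)).map (fun j => v0 + pvSel mods (j + 1))) := by
    rw [hpos, List.range_succ_eq_map]
    simp [pvSel_zero, List.map_map, Function.comp_def]
  have hfold : ∀ (ks : List Nat) (d : PySem.Dict Int Int) (f : Nat → Int),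
      ks.foldl (fun d m => d.insert (f m) mv) d = pvIns mv d (ks.map f) := by
    intro ks d f
    rw [pvIns, List.foldl_map]
  rw [hfold, hdbl, hsplit]
  simp [pvIns]

-- ===== VERDICT (by name: the statement is the Claim_ definition above) =====
theorem add_mem_permutations_py_spec : Claim_equal_add_mem_permutations_py := by
  intro mask bs mv mem _ hpre
  unfold Spec_add_mem_permutations_py
  unfold Pre_add_mem_permutations_py at hpre
  obtain ⟨v0, hv0⟩ := Option.isSome_iff_exists.mp hpre
  exact pvMain mask bs mv mem v0 hv0
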